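-- pv_equiv track=rewrite | github.com/bpal852/hk_squash_calendar_generator | ics_app.py | abbreviate_team_name
-- ===== SOURCE A (Python) =====
-- def abbreviate_team_name(team_name):
--     abbreviations = {
--         'Hong Kong Football Club': 'HKFC',
--         'Hong Kong Cricket Club': 'HKCC',
--         'Kowloon Cricket Club': 'KCC',
--         'Ladies Recreation Club': 'LRC',
--         'United Services Recreation Club': 'USRC',
--     }
--     for full_name, abbreviation in abbreviations.items():
--         team_name = team_name.replace(full_name, abbreviation)
--     return team_name
-- ===== SOURCE B (Python) =====
-- def abbreviate_team_name(team_name):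
--     abbreviations = {
--         'Hong Kong Football Club': 'HKFC',
--         'Hong Kong Cricket Club': 'HKCC',
--         'Kowloon Cricket Club': 'KCC',
--         'Ladies Recreation Club': 'LRC',
--         'United Services Recreation Club': 'USRC',
--     }
--     out = []
--     i = 0
--     n = len(team_name)
--     while i < n:
--         for full, abbr in abbreviations.items():
--             if team_name.startswith(full, i):
--                 out.append(abbr)
--                 i += len(full)
--                 break
--         else:
--             out.append(team_name[i])
--             i += 1
--     return ''.join(out)
-- ===== Notes on version B (the rewrite author's own statement) =====
-- stated objective: alternative
-- what changed: B replaces A's five sequential whole-string replace passes by a single left-to-right scan that at each position tries the abbreviation table and emits either the abbreviation or the current character, building the output once.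
import Mathlib
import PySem

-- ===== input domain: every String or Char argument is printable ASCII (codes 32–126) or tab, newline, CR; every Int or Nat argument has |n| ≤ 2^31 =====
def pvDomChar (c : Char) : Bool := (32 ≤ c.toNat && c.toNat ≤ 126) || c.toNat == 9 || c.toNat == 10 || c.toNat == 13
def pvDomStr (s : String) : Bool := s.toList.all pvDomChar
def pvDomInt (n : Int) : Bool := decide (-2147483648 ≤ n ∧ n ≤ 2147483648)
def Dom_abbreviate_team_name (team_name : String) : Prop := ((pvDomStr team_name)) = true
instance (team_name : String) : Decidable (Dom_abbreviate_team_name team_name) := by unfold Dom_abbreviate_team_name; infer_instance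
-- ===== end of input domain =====

-- B replaces A's five sequential whole-string replace passes by a single left-to-right
-- scan over the characters that tries the abbreviation table at each position (objective: alternative).

-- ===== PORT A =====
-- the dict literal of A, as an association list in insertion order
def pvAbbrevs : List (String × String) :=
  [("Hong Kong Football Club", "HKFC"),
   ("Hong Kong Cricket Club", "HKCC"),
   ("Kowloon Cricket Club", "KCC"),
   ("Ladies Recreation Club", "LRC"),
   ("United Services Recreation Club", "USRC")]

-- A: for full_name, abbreviation in abbreviations.items(): team_name = team_name.replace(full_name, abbreviation)
def abbreviate_team_name (team_name : String) : String :=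
  pvAbbrevs.foldl (fun t q => PySem.Str.replace t q.1 q.2) team_name

-- ===== PORT B =====
-- B's table, pattern/replacement as character lists
def pvTbl : List (List Char × List Char) :=
  [("Hong Kong Football Club".toList, "HKFC".toList),
   ("Hong Kong Cricket Club".toList, "HKCC".toList),
   ("Kowloon Cricket Club".toList, "KCC".toList),
   ("Ladies Recreation Club".toList, "LRC".toList),
   ("United Services Recreation Club".toList, "USRC".toList)]

-- B's while loop over positions; the inner for/else over the dict is the find?.
-- Fuel = number of characters left: each iteration consumes ≥ 1 character, so an
-- initial fuel of s.length makes the same computation total (guard only).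
def pvScanF (tbl : List (List Char × List Char)) : Nat → List Char → List Char
  | _, [] => []
  | 0, _ => []
  | fuel+1, c :: cs =>
    match tbl.find? (fun q => q.1.isPrefixOf (c :: cs)) with
    | some q => q.2 ++ pvScanF tbl fuel (cs.drop (q.1.length - 1))
    | none => c :: pvScanF tbl fuel cs

def pvScan (tbl : List (List Char × List Char)) (s : List Char) : List Char :=
  pvScanF tbl s.length s

def abbreviate_team_name_alt (team_name : String) : String :=
  String.ofList (pvScan pvTbl team_name.toList)

-- ===== PRECONDITION & SPEC =====
def Spec_abbreviate_team_name (team_name : String) (out : String) : Prop := out = abbreviate_team_name_alt team_name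
instance (team_name : String) (out : String) : Decidable (Spec_abbreviate_team_name team_name out) := by unfold Spec_abbreviate_team_name; infer_instance

-- ===== CLAIM (what is proved, stated in full; the proofs are below) =====
def Claim_equal_abbreviate_team_name : Prop := ∀ (team_name : String), Dom_abbreviate_team_name team_name → Spec_abbreviate_team_name team_name (abbreviate_team_name team_name)

-- ===== LEMMAS AND PROOFS =====

-- 'x and y start the same way' (one is a prefix of the other)
def pvCompat (x y : List Char) : Bool := x.isPrefixOf y || y.isPrefixOf x

theorem pvCompat_comm (x y : List Char) : pvCompat x y = pvCompat y x := by
  simp [pvCompat, Bool.or_comm]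

theorem pvCompat_false_iff (x y : List Char) :
    pvCompat x y = false ↔ ¬ x <+: y ∧ ¬ y <+: x := by
  rw [pvCompat, Bool.or_eq_false_iff]
  simp [← List.isPrefixOf_iff_prefix]

theorem pvPrefix_append_cases {x y z : List Char} (h : x <+: y ++ z) :
    x <+: y ∨ y <+: x :=
  List.prefix_or_prefix_of_prefix h (List.prefix_append y z)

-- fuel invariance: any fuel ≥ s.length computes the same scan
theorem pvScanF_fuel (tbl : List (List Char × List Char)) :
    ∀ f g s, s.length ≤ f → s.length ≤ g → pvScanF tbl f s = pvScanF tbl g s := by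
  intro f
  induction f with
  | zero =>
    intro g s hf _
    have hs : s = [] := by cases s with | nil => rfl | cons a l => simp at hf
    subst hs; cases g <;> rfl
  | succ f ih =>
    intro g s hf hg
    cases s with
    | nil => cases g <;> rfl
    | cons c cs =>
      cases g with
      | zero => simp at hg
      | succ g =>
        simp only [pvScanF]
        rcases hfind : tbl.find? (fun q => q.1.isPrefixOf (c :: cs)) with _ | q <;>
          simp only [hfind]
        · exact congrArg (c :: ·) (ih g cs (by simpa using hf) (by simpa using hg))
        · refine congrArg (q.2 ++ ·) (ih g _ ?_ ?_) <;>
            · have := List.length_drop (l := cs) (i := q.1.length - 1)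
              simp at hf hg; omega

theorem pvScan_nil (tbl : List (List Char × List Char)) : pvScan tbl [] = [] := rfl

theorem pvScan_cons_some {tbl : List (List Char × List Char)} {c : Char} {cs : List Char} {q : List Char × List Char}
    (h : tbl.find? (fun q => q.1.isPrefixOf (c :: cs)) = some q) :
    pvScan tbl (c :: cs) = q.2 ++ pvScan tbl (cs.drop (q.1.length - 1)) := by
  show pvScanF tbl (cs.length + 1) (c :: cs) = _
  simp only [pvScanF, h]
  refine congrArg (q.2 ++ ·) (pvScanF_fuel tbl _ _ _ ?_ le_rfl)
  have := List.length_drop (l := cs) (i := q.1.length - 1); omega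

theorem pvScan_cons_none {tbl : List (List Char × List Char)} {c : Char} {cs : List Char}
    (h : tbl.find? (fun q => q.1.isPrefixOf (c :: cs)) = none) :
    pvScan tbl (c :: cs) = c :: pvScan tbl cs := by
  show pvScanF tbl (cs.length + 1) (c :: cs) = _
  simp only [pvScanF, h]
  rfl

-- scan with the empty table is the identity
theorem pvScan_nil_tbl : ∀ s, pvScan [] s = s := by
  intro s
  induction s with
  | nil => rfl
  | cons c cs ih => rw [pvScan_cons_none rfl, ih]

-- consuming a matched pattern at the front
theorem pvScan_consume {tbl : List (List Char × List Char)} {w z : List Char} {q : List Char × List Char}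
    (hw : w ≠ []) (hq : q.1 = w)
    (hfind : tbl.find? (fun e => e.1.isPrefixOf (w ++ z)) = some q) :
    pvScan tbl (w ++ z) = q.2 ++ pvScan tbl z := by
  obtain ⟨d, t, rfl⟩ := List.exists_cons_of_ne_nil hw
  rw [List.cons_append] at hfind ⊢
  rw [pvScan_cons_some hfind, hq]
  simp

-- skipping over a block no table pattern can start inside
theorem pvScan_skip (tbl : List (List Char × List Char)) :
    ∀ w u, (∀ q ∈ tbl, ∀ p, p < w.length → pvCompat (w.drop p) q.1 = false) →
      pvScan tbl (w ++ u) = w ++ pvScan tbl u := by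
  intro w
  induction w with
  | nil => intro u _; rfl
  | cons c w' ih =>
    intro u h
    have hnone : tbl.find? (fun q => q.1.isPrefixOf ((c :: w') ++ u)) = none := by
      rw [List.find?_eq_none]
      intro q hq hpre
      rw [List.isPrefixOf_iff_prefix] at hpre
      have h0 := (pvCompat_false_iff _ _).mp (h q hq 0 (by simp))
      rw [List.drop_zero] at h0
      rcases pvPrefix_append_cases hpre with h1 | h1
      · exact h0.2 h1
      · exact h0.1 h1
    rw [List.cons_append] at hnone ⊢
    rw [pvScan_cons_none hnone]
    refine congrArg (c :: ·) (ih u ?_)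
    intro q hq p hp
    have := h q hq (p + 1) (by simp; omega)
    simpa using this

-- find? is unchanged when everything after the matched prefix is replaced
theorem pvFind_stable :
    ∀ (tbl : List (List Char × List Char)) (s z : List Char) (q0 : List Char × List Char),
      (∀ q ∈ tbl, ∀ q' ∈ tbl, q.1 ≠ q'.1 → pvCompat q.1 q'.1 = false) →
      tbl.find? (fun q => q.1.isPrefixOf s) = some q0 →
      tbl.find? (fun q => q.1.isPrefixOf (q0.1 ++ z)) = some q0 := by
  intro tbl
  induction tbl with
  | nil => intro s z q0 _ hfind; simp at hfind
  | cons e tl ih =>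
    intro s z q0 hPair hfind
    by_cases he : e.1.isPrefixOf s = true
    · have hstep := List.find?_cons_of_pos (p := fun (q : List Char × List Char) => q.1.isPrefixOf s) (a := e) (l := tl) he
      rw [hstep] at hfind
      obtain rfl : e = q0 := by simpa using hfind
      exact List.find?_cons_of_pos (p := fun (q : List Char × List Char) => q.1.isPrefixOf (e.1 ++ z)) (a := e) (l := tl)
        (by rw [List.isPrefixOf_iff_prefix]; exact List.prefix_append _ _)
    · have hstep := List.find?_cons_of_neg (p := fun (q : List Char × List Char) => q.1.isPrefixOf s) (a := e) (l := tl) he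
      rw [hstep] at hfind
      have hq0mem : q0 ∈ tl := List.mem_of_find?_eq_some hfind
      have hq0pre : q0.1 <+: s := by
        have := List.find?_some hfind
        rwa [List.isPrefixOf_iff_prefix] at this
      have hne : e.1.isPrefixOf (q0.1 ++ z) = false := by
        rw [Bool.eq_false_iff]
        intro hpre
        rw [List.isPrefixOf_iff_prefix] at hpre
        rcases pvPrefix_append_cases hpre with h1 | h1
        · exact he (List.isPrefixOf_iff_prefix.mpr (h1.trans hq0pre))
        · by_cases heq : e.1 = q0.1
          · exact he (List.isPrefixOf_iff_prefix.mpr (heq ▸ hq0pre))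
          · have := (pvCompat_false_iff _ _).mp
              (hPair e (List.mem_cons_self) q0 (List.mem_cons_of_mem _ hq0mem) heq)
            exact this.2 h1
      have hstep2 := List.find?_cons_of_neg (p := fun (q : List Char × List Char) => q.1.isPrefixOf (q0.1 ++ z)) (a := e) (l := tl) (by simp [hne])
      rw [hstep2]
      exact ih s z q0 (fun q hq q' hq' => hPair q (List.mem_cons_of_mem _ hq) q' (List.mem_cons_of_mem _ hq')) hfind

-- replacing (n,b) cannot create a fresh start of any rest-pattern
theorem pvNoCreate (n b : List Char) (rest : List (List Char × List Char))
    (hn : n ≠ []) (hb : b ≠ [])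
    (hRepl : ∀ q ∈ rest, ∀ p, p < b.length → pvCompat (b.drop p) q.1 = false)
    (hRB : ∀ q ∈ rest, ∀ p, p < q.1.length → 0 < p → pvCompat (q.1.drop p) b = false) :
    ∀ N s, s.length ≤ N → ∀ q ∈ rest, ∀ p, p < q.1.length →
      ¬ q.1.drop p <+: s → ¬ q.1.drop p <+: pvScan [(n, b)] s := by
  intro N
  induction N with
  | zero =>
    intro s hs q hq p hp hns
    have : s = [] := by cases s with | nil => rfl | cons a l => simp at hs
    subst this
    rw [pvScan_nil]
    intro hpre
    rw [List.prefix_nil] at hpre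
    have : q.1.length ≤ p := by
      have := congrArg List.length hpre
      simp at this; omega
    omega
  | succ N ih =>
    intro s hs q hq p hp hns
    by_cases hpre : n <+: s
    · -- a match at the front: the output starts with b, which no rest-pattern tail can start like
      obtain ⟨t, rfl⟩ := hpre
      have hfind : List.find? (fun (e : List Char × List Char) => e.1.isPrefixOf (n ++ t)) [(n, b)] = some (n, b) :=
        List.find?_cons_of_pos (by rw [List.isPrefixOf_iff_prefix]; exact List.prefix_append _ _)
      rw [pvScan_consume hn rfl hfind]
      intro hx
      rcases pvPrefix_append_cases hx with h1 | h1
      · rcases Nat.eq_zero_or_pos p with rfl | hppos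
        · rw [List.drop_zero] at h1
          exact ((pvCompat_false_iff _ _).mp (hRepl q hq 0 (by cases b with | nil => exact absurd rfl hb | cons x l => simp))).2
            (by simpa using h1)
        · exact ((pvCompat_false_iff _ _).mp (hRB q hq p hp hppos)).1 h1
      · rcases Nat.eq_zero_or_pos p with rfl | hppos
        · rw [List.drop_zero] at h1
          exact ((pvCompat_false_iff _ _).mp (hRepl q hq 0 (by cases b with | nil => exact absurd rfl hb | cons x l => simp))).1
            (by simpa using h1)
        · exact ((pvCompat_false_iff _ _).mp (hRB q hq p hp hppos)).2 h1
    · cases s with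
      | nil =>
        rw [pvScan_nil]
        intro hx
        rw [List.prefix_nil] at hx
        have := congrArg List.length hx
        simp at this; omega
      | cons c cs =>
        have hfind : List.find? (fun (e : List Char × List Char) => e.1.isPrefixOf (c :: cs)) [(n, b)] = none := by
          rw [List.find?_eq_none]
          intro x hx
          obtain rfl : x = (n, b) := by simpa using hx
          simpa [List.isPrefixOf_iff_prefix] using hpre
        rw [pvScan_cons_none hfind]
        intro hx
        rw [List.drop_eq_getElem_cons hp] at hx hns
        rw [List.cons_prefix_cons] at hx hns
        obtain ⟨hc, hx'⟩ := hx
        by_cases hp1 : p + 1 < q.1.length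
        · have hns' : ¬ q.1.drop (p + 1) <+: cs := fun hcon => hns ⟨hc, hcon⟩
          exact ih cs (by simpa using hs) q hq (p + 1) hp1 hns' hx'
        · have : q.1.drop (p + 1) = [] := List.drop_eq_nil_of_le (by omega)
          exact hns ⟨hc, this ▸ List.nil_prefix⟩

-- the main exchange: one replace pass followed by a scan over the remaining table
-- equals the scan over the full table
theorem pvSwap (n b : List Char) (rest : List (List Char × List Char))
    (hn : n ≠ []) (hb : b ≠ [])
    (hr : ∀ q ∈ rest, q.1 ≠ [])
    (hAB : ∀ q ∈ rest, ∀ p, p < n.length → pvCompat (n.drop p) q.1 = false)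
    (hBA : ∀ q ∈ rest, ∀ p, p < q.1.length → 0 < p → pvCompat (q.1.drop p) n = false)
    (hRepl : ∀ q ∈ rest, ∀ p, p < b.length → pvCompat (b.drop p) q.1 = false)
    (hRB : ∀ q ∈ rest, ∀ p, p < q.1.length → 0 < p → pvCompat (q.1.drop p) b = false)
    (hPair : ∀ q ∈ rest, ∀ q' ∈ rest, q.1 ≠ q'.1 → pvCompat q.1 q'.1 = false) :
    ∀ s, pvScan rest (pvScan [(n, b)] s) = pvScan ((n, b) :: rest) s := by
  have main : ∀ N s, s.length ≤ N → pvScan rest (pvScan [(n, b)] s) = pvScan ((n, b) :: rest) s := by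
    intro N
    induction N with
    | zero =>
      intro s hs
      have : s = [] := by cases s with | nil => rfl | cons a l => simp at hs
      subst this
      rw [pvScan_nil, pvScan_nil, pvScan_nil]
    | succ N ih =>
      intro s hs
      by_cases hpre : n <+: s
      · -- the head pattern matches at the front
        obtain ⟨t, rfl⟩ := hpre
        have hfind1 : List.find? (fun (e : List Char × List Char) => e.1.isPrefixOf (n ++ t)) [(n, b)] = some (n, b) :=
          List.find?_cons_of_pos (by rw [List.isPrefixOf_iff_prefix]; exact List.prefix_append _ _)
        rw [pvScan_consume hn rfl hfind1]
        rw [pvScan_skip rest b _ (fun q hq p hp => hRepl q hq p hp)]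
        have hlen : t.length ≤ N := by
          have : 1 ≤ n.length := by cases n with | nil => exact absurd rfl hn | cons x l => simp
          simp at hs; omega
        rw [ih t hlen]
        have hfind2 : List.find? (fun (e : List Char × List Char) => e.1.isPrefixOf (n ++ t)) ((n, b) :: rest) = some (n, b) :=
          List.find?_cons_of_pos (by rw [List.isPrefixOf_iff_prefix]; exact List.prefix_append _ _)
        rw [pvScan_consume hn rfl hfind2]
      · rcases hfr : rest.find? (fun q => q.1.isPrefixOf s) with _ | q0
        · -- no pattern matches at the front
          cases s with
          | nil => rw [pvScan_nil, pvScan_nil, pvScan_nil]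
          | cons c cs =>
            have hfind1 : List.find? (fun (e : List Char × List Char) => e.1.isPrefixOf (c :: cs)) [(n, b)] = none := by
              rw [List.find?_eq_none]
              intro x hx
              obtain rfl : x = (n, b) := by simpa using hx
              simpa [List.isPrefixOf_iff_prefix] using hpre
            rw [pvScan_cons_none hfind1]
            have hnomatch := List.find?_eq_none.mp hfr
            have hfind2 : rest.find? (fun q => q.1.isPrefixOf (c :: pvScan [(n, b)] cs)) = none := by
              rw [List.find?_eq_none]
              intro q hq hqp
              rw [List.isPrefixOf_iff_prefix] at hqp
              have hnc := pvNoCreate n b rest hn hb hRepl hRB (cs.length + 1) (c :: cs) (by simp)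
                q hq 0 (by cases hq1 : q.1 with
                  | nil => exact absurd hq1 (hr q hq)
                  | cons x l => simp)
                (by rw [List.drop_zero]
                    intro hcon
                    exact hnomatch q hq (List.isPrefixOf_iff_prefix.mpr hcon))
              rw [List.drop_zero] at hnc
              rw [pvScan_cons_none hfind1] at hnc
              exact hnc hqp
            rw [pvScan_cons_none hfind2]
            rw [ih cs (by simpa using hs)]
            have hfind3 : List.find? (fun (e : List Char × List Char) => e.1.isPrefixOf (c :: cs)) ((n, b) :: rest) = none := by
              rw [List.find?_eq_none]
              intro q hq
              rcases List.mem_cons.mp hq with rfl | hq'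
              · simpa [List.isPrefixOf_iff_prefix] using hpre
              · exact hnomatch q hq'
            rw [pvScan_cons_none hfind3]
        · -- a later pattern q0 matches at the front
          have hq0mem : q0 ∈ rest := List.mem_of_find?_eq_some hfr
          have hq0pre : q0.1 <+: s := by
            have := List.find?_some hfr
            rwa [List.isPrefixOf_iff_prefix] at this
          obtain ⟨u, rfl⟩ := hq0pre
          have hskip : pvScan [(n, b)] (q0.1 ++ u) = q0.1 ++ pvScan [(n, b)] u := by
            refine pvScan_skip [(n, b)] q0.1 u ?_
            intro q hq p hp
            obtain rfl : q = (n, b) := by simpa using hq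
            rcases Nat.eq_zero_or_pos p with rfl | hppos
            · rw [List.drop_zero, pvCompat_comm]
              have := hAB q0 hq0mem 0 (by cases n with | nil => exact absurd rfl hn | cons x l => simp)
              rwa [List.drop_zero] at this
            · exact hBA q0 hq0mem p hp hppos
          rw [hskip]
          have hstable := pvFind_stable rest (q0.1 ++ u) (pvScan [(n, b)] u) q0 hPair hfr
          rw [pvScan_consume (hr q0 hq0mem) rfl hstable]
          have hlen : u.length ≤ N := by
            have : 1 ≤ q0.1.length := by
              cases hq1 : q0.1 with
                | nil => exact absurd hq1 (hr q0 hq0mem)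
                | cons x l => simp
            simp at hs; omega
          rw [ih u hlen]
          have hfind4 : List.find? (fun (e : List Char × List Char) => e.1.isPrefixOf (q0.1 ++ u)) ((n, b) :: rest) = some q0 := by
            have hstep := List.find?_cons_of_neg (p := fun (e : List Char × List Char) => e.1.isPrefixOf (q0.1 ++ u)) (a := (n, b)) (l := rest)
              (by simpa [List.isPrefixOf_iff_prefix] using hpre)
            rw [hstep, hfr]
          rw [pvScan_consume (hr q0 hq0mem) rfl hfind4]
  intro s
  exact main s.length s le_rfl

-- Python replace (nonempty pattern) IS the single-pattern scan
theorem pvReplace_eq_scan (old new : List Char) (hold : old ≠ []) (s : List Char) :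
    PySem.Chars.replace s old new = pvScan [(old, new)] s := by
  have hgo : ∀ fuel l acc, l.length ≤ fuel →
      PySem.Chars.replace.go old new fuel l acc = acc.reverse ++ pvScan [(old, new)] l := by
    intro fuel
    induction fuel with
    | zero =>
      intro l acc hl
      have : l = [] := by cases l with | nil => rfl | cons a t => simp at hl
      subst this
      show acc.reverse ++ [] = _
      rw [pvScan_nil]
    | succ fuel ih =>
      intro l acc hl
      cases l with
      | nil => show acc.reverse = _; rw [pvScan_nil, List.append_nil]
      | cons c t =>
        show (if old.isPrefixOf (c :: t) = true
            then PySem.Chars.replace.go old new fuel (List.drop old.length (c :: t)) (new.reverse ++ acc)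
            else PySem.Chars.replace.go old new fuel t (c :: acc)) = _
        by_cases hm : old.isPrefixOf (c :: t) = true
        · rw [if_pos hm]
          have hlen : (List.drop old.length (c :: t)).length ≤ fuel := by
            have h1 : 1 ≤ old.length := by cases old with | nil => exact absurd rfl hold | cons x l => simp
            simp at hl ⊢; omega
          rw [ih _ _ hlen]
          have hfind : List.find? (fun (e : List Char × List Char) => e.1.isPrefixOf (c :: t)) [(old, new)] = some (old, new) :=
            List.find?_cons_of_pos hm
          rw [pvScan_cons_some hfind]
          obtain ⟨o, t0, rfl⟩ := List.exists_cons_of_ne_nil hold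
          simp [List.drop_succ_cons]
        · rw [if_neg hm]
          rw [ih _ _ (by simpa using hl)]
          have hfind : List.find? (fun (e : List Char × List Char) => e.1.isPrefixOf (c :: t)) [(old, new)] = none := by
            rw [List.find?_eq_none]
            intro x hx
            obtain rfl : x = (old, new) := by simpa using hx
            simpa using hm
          rw [pvScan_cons_none hfind]
          simp
  have hne : old.isEmpty = false := by cases old with | nil => exact absurd rfl hold | cons x l => rfl
  rw [PySem.Chars.replace, hne]
  simpa using hgo s.length s [] le_rfl

-- the five exchange steps, instantiated at the concrete table (side conditions by decide)
theorem pvStep0 (x : List Char) :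
    pvScan [("Hong Kong Cricket Club".toList, "HKCC".toList),
            ("Kowloon Cricket Club".toList, "KCC".toList),
            ("Ladies Recreation Club".toList, "LRC".toList),
            ("United Services Recreation Club".toList, "USRC".toList)]
      (pvScan [("Hong Kong Football Club".toList, "HKFC".toList)] x) = pvScan pvTbl x := by
  have h := pvSwap "Hong Kong Football Club".toList "HKFC".toList
    [("Hong Kong Cricket Club".toList, "HKCC".toList),
     ("Kowloon Cricket Club".toList, "KCC".toList),
     ("Ladies Recreation Club".toList, "LRC".toList),
     ("United Services Recreation Club".toList, "USRC".toList)]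
    (by decide) (by decide) (by decide) (by decide) (by decide) (by decide) (by decide) (by decide) x
  exact h

theorem pvStep1 (x : List Char) :
    pvScan [("Kowloon Cricket Club".toList, "KCC".toList),
            ("Ladies Recreation Club".toList, "LRC".toList),
            ("United Services Recreation Club".toList, "USRC".toList)]
      (pvScan [("Hong Kong Cricket Club".toList, "HKCC".toList)] x) =
    pvScan [("Hong Kong Cricket Club".toList, "HKCC".toList),
            ("Kowloon Cricket Club".toList, "KCC".toList),
            ("Ladies Recreation Club".toList, "LRC".toList),
            ("United Services Recreation Club".toList, "USRC".toList)] x :=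
  pvSwap _ _ _ (by decide) (by decide) (by decide) (by decide) (by decide) (by decide) (by decide) (by decide) x

theorem pvStep2 (x : List Char) :
    pvScan [("Ladies Recreation Club".toList, "LRC".toList),
            ("United Services Recreation Club".toList, "USRC".toList)]
      (pvScan [("Kowloon Cricket Club".toList, "KCC".toList)] x) =
    pvScan [("Kowloon Cricket Club".toList, "KCC".toList),
            ("Ladies Recreation Club".toList, "LRC".toList),
            ("United Services Recreation Club".toList, "USRC".toList)] x :=
  pvSwap _ _ _ (by decide) (by decide) (by decide) (by decide) (by decide) (by decide) (by decide) (by decide) x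

theorem pvStep3 (x : List Char) :
    pvScan [("United Services Recreation Club".toList, "USRC".toList)]
      (pvScan [("Ladies Recreation Club".toList, "LRC".toList)] x) =
    pvScan [("Ladies Recreation Club".toList, "LRC".toList),
            ("United Services Recreation Club".toList, "USRC".toList)] x :=
  pvSwap _ _ _ (by decide) (by decide) (by decide) (by decide) (by decide) (by decide) (by decide) (by decide) x

theorem pvStep4 (x : List Char) :
    pvScan [] (pvScan [("United Services Recreation Club".toList, "USRC".toList)] x) =
    pvScan [("United Services Recreation Club".toList, "USRC".toList)] x :=
  pvScan_nil_tbl _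

-- ===== VERDICT (by name: the statement is the Claim_ definition above) =====
theorem abbreviate_team_name_spec : Claim_equal_abbreviate_team_name := by
  intro t _
  show abbreviate_team_name t = abbreviate_team_name_alt t
  apply String.toList_inj.mp
  simp only [abbreviate_team_name, abbreviate_team_name_alt, pvAbbrevs, List.foldl_cons,
    List.foldl_nil, PySem.Str.toList_replace, String.toList_ofList]
  rw [pvReplace_eq_scan _ _ (by decide), pvReplace_eq_scan _ _ (by decide),
    pvReplace_eq_scan _ _ (by decide), pvReplace_eq_scan _ _ (by decide),
    pvReplace_eq_scan _ _ (by decide)]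
  rw [← pvStep0 t.toList, ← pvStep1, ← pvStep2, ← pvStep3, ← pvStep4]
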